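-- pv_equiv track=rewrite | github.com/junghankim-git/test_codes | program/ocn_grid/draw/v1.0/class_ocn_grid.py | gen_lsmask
-- ===== SOURCE A (Python) =====
-- def gen_lsmask(nx,ny):
--
--     mask   = [[-1 for j in range(ny)] for i in range(nx)]
--     mask_l = [[-1 for j in range(ny)] for i in range(nx)]
--     mask_s = [[-1 for j in range(ny)] for i in range(nx)]
--
--     fx = 0.4
--     fy = 0.4
--     max_land_xwidth = int(float(nx)*fx)
--     max_land_ywidth = int(float(ny)*fy)
--     #print max_land_xwidth,max_land_ywidth
--
--     # left, down
--     cnt = 0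
--     for j in range(max_land_ywidth):
--         for i in range(max_land_xwidth-cnt):
--             mask[i][j] = 1
--         cnt = cnt+1
--
--     # right, up
--     cnt = 0
--     for j in range(ny-1,max_land_ywidth,-1):
--         for i in range(nx-max_land_xwidth+cnt,nx):
--             mask[i][j] = 1
--         cnt = cnt+1
--
--     for i in range(nx):
--         for j in range(ny):
--             if mask[i][j]!=1: mask[i][j]=0
--             if mask[i][j]==0:
--                 mask_s[i][j] = 0
--             elif mask[i][j]==1:
--                 mask_l[i][j] = 1
--
--     return mask, mask_l, mask_s
-- ===== SOURCE B (Python) =====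
-- def gen_lsmask(nx, ny):
--     xw = int(float(nx)*0.4)
--     yw = int(float(ny)*0.4)
--
--     def land(i, j):
--         return (j < yw and i < xw - j) or (j > yw and i >= nx - xw + (ny - 1 - j))
--
--     mask   = [[1 if land(i, j) else 0 for j in range(ny)] for i in range(nx)]
--     mask_l = [[1 if land(i, j) else -1 for j in range(ny)] for i in range(nx)]
--     mask_s = [[-1 if land(i, j) else 0 for j in range(ny)] for i in range(nx)]
--     return mask, mask_l, mask_s
-- ===== Notes on version B (the rewrite author's own statement) =====
-- stated objective: simpler
-- what changed: Replaces the init-to-minus-one grids, the two triangle-painting loop nests with a running counter, and the final normalization pass by one closed-form land predicate per cell, building the three grids directly in single comprehensions.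
import Mathlib
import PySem

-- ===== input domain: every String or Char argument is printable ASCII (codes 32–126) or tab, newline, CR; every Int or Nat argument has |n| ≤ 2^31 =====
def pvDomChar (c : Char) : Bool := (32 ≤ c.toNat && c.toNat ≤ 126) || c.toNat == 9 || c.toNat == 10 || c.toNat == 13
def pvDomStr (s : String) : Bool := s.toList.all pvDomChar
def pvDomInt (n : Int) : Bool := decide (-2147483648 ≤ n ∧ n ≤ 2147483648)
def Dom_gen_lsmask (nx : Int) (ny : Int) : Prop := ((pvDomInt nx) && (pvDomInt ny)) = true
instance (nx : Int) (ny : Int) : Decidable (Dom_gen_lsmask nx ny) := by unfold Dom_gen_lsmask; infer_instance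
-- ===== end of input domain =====

set_option maxHeartbeats 1000000

-- B replaces the init-to-(-1) grids, two triangle-painting loop nests and the final
-- normalization pass of A by one closed-form land/sea predicate per cell (objective: simpler).


-- ===== PORT A =====
-- int(float(n)*0.4): hand-port of the float expression (PySem has no floats).
-- Exact for |n| ≤ 2^31: float(n) is exact below 2^53, and rounding analysis (checked
-- against CPython over the domain) shows int(float(n)*0.4) = trunc(2n/5) there.
def pvTrunc04 (n : Int) : Int := if 0 ≤ n then 2 * n / 5 else -(2 * (-n) / 5)

-- [[-1 for j in range(ny)] for i in range(nx)]
def pvInitGrid (nx ny : Int) : List (List Int) :=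
  (PySem.List.pyRange 0 nx 1).map (fun _ => (PySem.List.pyRange 0 ny 1).map (fun _ => (-1 : Int)))

-- g[i][j]  (always read in range by A)
def pvGet2 (g : List (List Int)) (i j : Int) : Int :=
  PySem.List.pyGetD (PySem.List.pyGetD g i []) j 0

-- g[i][j] = v  (always written in range by A)
def pvSet2 (g : List (List Int)) (i j v : Int) : List (List Int) :=
  PySem.List.pySetD g i (PySem.List.pySetD (PySem.List.pyGetD g i []) j v)

-- body of "for j in range(max_land_ywidth)": paints i in range(xw-cnt), then cnt += 1
def pvLoop1 (xw : Int) (st : List (List Int) × Int) (j : Int) : List (List Int) × Int :=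
  ((PySem.List.pyRange 0 (xw - st.2) 1).foldl (fun g i => pvSet2 g i j 1) st.1, st.2 + 1)

-- body of "for j in range(ny-1, max_land_ywidth, -1)": paints i in range(nx-xw+cnt, nx)
def pvLoop2 (nx xw : Int) (st : List (List Int) × Int) (j : Int) : List (List Int) × Int :=
  ((PySem.List.pyRange (nx - xw + st.2) nx 1).foldl (fun g i => pvSet2 g i j 1) st.1, st.2 + 1)

-- body of the final normalization double loop, at cell (i, j)
def pvNormStep (i : Int) (st : List (List Int) × List (List Int) × List (List Int)) (j : Int) :
    List (List Int) × List (List Int) × List (List Int) :=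
  let m := if pvGet2 st.1 i j ≠ 1 then pvSet2 st.1 i j 0 else st.1
  if pvGet2 m i j = 0 then (m, st.2.1, pvSet2 st.2.2 i j 0)
  else if pvGet2 m i j = 1 then (m, pvSet2 st.2.1 i j 1, st.2.2)
  else (m, st.2.1, st.2.2)

def pvNormRow (ny : Int) (st : List (List Int) × List (List Int) × List (List Int)) (i : Int) :
    List (List Int) × List (List Int) × List (List Int) :=
  (PySem.List.pyRange 0 ny 1).foldl (pvNormStep i) st

def gen_lsmask (nx : Int) (ny : Int) : List (List Int) × List (List Int) × List (List Int) :=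
  let mask := pvInitGrid nx ny
  let mask_l := pvInitGrid nx ny
  let mask_s := pvInitGrid nx ny
  let xw := pvTrunc04 nx
  let yw := pvTrunc04 ny
  let r1 := (PySem.List.pyRange 0 yw 1).foldl (pvLoop1 xw) (mask, 0)
  let r2 := (PySem.List.pyRange (ny - 1) yw (-1)).foldl (pvLoop2 nx xw) (r1.1, 0)
  let fin := (PySem.List.pyRange 0 nx 1).foldl (pvNormRow ny) (r2.1, mask_l, mask_s)
  (fin.1, fin.2.1, fin.2.2)

-- ===== PORT B =====
def pvLand (nx ny xw yw i j : Int) : Bool :=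
  (decide (j < yw) && decide (i < xw - j)) || (decide (yw < j) && decide (nx - xw + (ny - 1 - j) ≤ i))

def gen_lsmask_alt (nx : Int) (ny : Int) : List (List Int) × List (List Int) × List (List Int) :=
  let xw := pvTrunc04 nx
  let yw := pvTrunc04 ny
  ((PySem.List.pyRange 0 nx 1).map (fun i =>
      (PySem.List.pyRange 0 ny 1).map (fun j => if pvLand nx ny xw yw i j then (1 : Int) else 0)),
   (PySem.List.pyRange 0 nx 1).map (fun i =>
      (PySem.List.pyRange 0 ny 1).map (fun j => if pvLand nx ny xw yw i j then (1 : Int) else -1)),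
   (PySem.List.pyRange 0 nx 1).map (fun i =>
      (PySem.List.pyRange 0 ny 1).map (fun j => if pvLand nx ny xw yw i j then (-1 : Int) else 0)))

-- ===== PRECONDITION & SPEC =====
def Spec_gen_lsmask (nx : Int) (ny : Int) (out : List (List Int) × List (List Int) × List (List Int)) : Prop := out = gen_lsmask_alt nx ny
instance (nx : Int) (ny : Int) (out : List (List Int) × List (List Int) × List (List Int)) : Decidable (Spec_gen_lsmask nx ny out) := by unfold Spec_gen_lsmask; infer_instance

-- ===== CLAIM (what is proved, stated in full; the proofs are below) =====
def Claim_equal_gen_lsmask : Prop := ∀ (nx : Int) (ny : Int), Dom_gen_lsmask nx ny → Spec_gen_lsmask nx ny (gen_lsmask nx ny)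

-- ===== LEMMAS AND PROOFS =====

def pvShape (n m : Nat) (g : List (List Int)) : Prop :=
  g.length = n ∧ ∀ r ∈ g, r.length = m

lemma pvGet2_nonneg {g : List (List Int)} {i j : Int} (hi0 : 0 ≤ i) (hj0 : 0 ≤ j) :
    pvGet2 g i j = (g.getD i.toNat []).getD j.toNat 0 := by
  obtain ⟨a, rfl⟩ : ∃ a : Nat, i = (a : Int) := ⟨i.toNat, by omega⟩
  obtain ⟨b, rfl⟩ : ∃ b : Nat, j = (b : Int) := ⟨j.toNat, by omega⟩
  simp [pvGet2, PySem.List.pyGetD_natCast]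

lemma pvShape_init (nx ny : Int) : pvShape nx.toNat ny.toNat (pvInitGrid nx ny) := by
  constructor
  · simp [pvInitGrid, PySem.List.length_pyRange_one]
  · intro r hr
    simp only [pvInitGrid, List.mem_map] at hr
    obtain ⟨a, _, rfl⟩ := hr
    simp [PySem.List.length_pyRange_one]

lemma pvGet2_init {nx ny i j : Int} (hi0 : 0 ≤ i) (hi : i < nx) (hj0 : 0 ≤ j) (hj : j < ny) :
    pvGet2 (pvInitGrid nx ny) i j = -1 := by
  rw [pvGet2, pvInitGrid,
    PySem.List.pyGetD_map_pyRange_of_nonneg _ nx i [] hi0 hi,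
    PySem.List.pyGetD_map_pyRange_of_nonneg _ ny j 0 hj0 hj]

lemma pvShape_pvSet2 {n m : Nat} {g : List (List Int)} (hg : pvShape n m g)
    {i j : Int} (v : Int) (hi0 : 0 ≤ i) (hj0 : 0 ≤ j) :
    pvShape n m (pvSet2 g i j v) := by
  obtain ⟨hlen, hrow⟩ := hg
  rw [pvSet2, PySem.List.pySetD_of_nonneg _ _ hi0, PySem.List.pySetD_of_nonneg _ _ hj0]
  constructor
  · simpa using hlen
  · intro r hr
    rcases List.mem_iff_getElem.mp hr with ⟨k, hk, rfl⟩
    rw [List.getElem_set]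
    split
    · next he =>
      have hkg : k < g.length := by simpa using hk
      subst he
      rw [PySem.List.pyGetD_eq_getElem g [] hi0 (by omega), List.length_set]
      exact hrow _ (List.getElem_mem _)
    · exact hrow _ (List.getElem_mem _)

lemma pvGet2_pvSet2 {n m : Nat} {g : List (List Int)} (hg : pvShape n m g)
    {i j i' j' : Int} (v : Int)
    (hi0 : 0 ≤ i) (hi : i < (n : Int)) (hj0 : 0 ≤ j) (_hj : j < (m : Int))
    (hi'0 : 0 ≤ i') (hi' : i' < (n : Int)) (hj'0 : 0 ≤ j') (hj' : j' < (m : Int)) :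
    pvGet2 (pvSet2 g i j v) i' j' = if i' = i ∧ j' = j then v else pvGet2 g i' j' := by
  obtain ⟨hlen, hrow⟩ := hg
  have hiN : i.toNat < g.length := by omega
  have hi'N : i'.toNat < g.length := by omega
  have hrowi : (PySem.List.pyGetD g i []) = g[i.toNat] :=
    PySem.List.pyGetD_eq_getElem g [] hi0 (by omega)
  have hrl : g[i.toNat].length = m := hrow _ (List.getElem_mem _)
  have hrl' : g[i'.toNat].length = m := hrow _ (List.getElem_mem _)
  rw [pvSet2, PySem.List.pySetD_of_nonneg _ _ hi0, PySem.List.pySetD_of_nonneg _ _ hj0,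
    hrowi, pvGet2_nonneg hi'0 hj'0, pvGet2_nonneg hi'0 hj'0]
  rw [List.getD_eq_getElem (g.set i.toNat (g[i.toNat].set j.toNat v)) []
      (by rw [List.length_set]; exact hi'N),
    List.getElem_set, List.getD_eq_getElem g [] hi'N]
  by_cases hii : i' = i
  · rw [if_pos (by omega)]
    have hsub : g[i'.toNat] = g[i.toNat] := by congr 1; omega
    rw [List.getD_eq_getElem (g[i.toNat].set j.toNat v) 0
        (by rw [List.length_set]; omega),
      List.getElem_set, hsub,
      List.getD_eq_getElem g[i.toNat] 0 (by omega : j'.toNat < g[i.toNat].length)]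
    by_cases hjj : j' = j
    · rw [if_pos (by omega), if_pos ⟨hii, hjj⟩]
    · rw [if_neg (by omega), if_neg (by tauto)]
  · rw [if_neg (by omega), if_neg (by tauto)]

-- characterization of the inner paint loop "for i in range(lo, hi): g[i][j] = 1"
lemma pvPaint_char {n m : Nat} {j : Int} (hj0 : 0 ≤ j) (hjm : j < (m : Int)) :
    ∀ (fuel : Nat) (lo hi : Int) (g : List (List Int)), (hi - lo).toNat = fuel →
      0 ≤ lo → hi ≤ (n : Int) → pvShape n m g →
      pvShape n m ((PySem.List.pyRange lo hi 1).foldl (fun g i => pvSet2 g i j 1) g) ∧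
      ∀ i' j', 0 ≤ i' → i' < (n : Int) → 0 ≤ j' → j' < (m : Int) →
        pvGet2 ((PySem.List.pyRange lo hi 1).foldl (fun g i => pvSet2 g i j 1) g) i' j' =
          if j' = j ∧ lo ≤ i' ∧ i' < hi then 1 else pvGet2 g i' j' := by
  intro fuel
  induction fuel with
  | zero =>
    intro lo hi g hf hlo hhi hg
    rw [PySem.List.pyRange_one_eq_nil (by omega : hi ≤ lo)]
    refine ⟨hg, ?_⟩
    intro i' j' _ _ _ _
    simp only [List.foldl_nil]
    rw [if_neg (by omega)]
  | succ k ih =>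
    intro lo hi g hf hlo hhi hg
    rw [PySem.List.pyRange_one_cons (by omega : lo < hi)]
    simp only [List.foldl_cons]
    have hg' : pvShape n m (pvSet2 g lo j 1) := pvShape_pvSet2 hg 1 hlo hj0
    obtain ⟨hs, hc⟩ := ih (lo + 1) hi (pvSet2 g lo j 1) (by omega) (by omega) hhi hg'
    refine ⟨hs, ?_⟩
    intro i' j' hi'0 hi' hj'0 hj'
    rw [hc i' j' hi'0 hi' hj'0 hj',
      pvGet2_pvSet2 hg 1 hlo (by omega) hj0 hjm hi'0 hi' hj'0 hj']
    split_ifs with h1 h2 h3 h4 <;> try rfl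
    · omega
    · omega
    · omega

-- characterization of the lower-left triangle loop
lemma pvLoop1_char {n m : Nat} {xw yw : Int} (hxw : xw ≤ (n : Int)) (hyw : yw ≤ (m : Int)) :
    ∀ (fuel : Nat) (a : Int) (g : List (List Int)), (yw - a).toNat = fuel →
      0 ≤ a → pvShape n m g →
      pvShape n m ((PySem.List.pyRange a yw 1).foldl (pvLoop1 xw) (g, a)).1 ∧
      ∀ i' j', 0 ≤ i' → i' < (n : Int) → 0 ≤ j' → j' < (m : Int) →
        pvGet2 ((PySem.List.pyRange a yw 1).foldl (pvLoop1 xw) (g, a)).1 i' j' =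
          if a ≤ j' ∧ j' < yw ∧ i' < xw - j' then 1 else pvGet2 g i' j' := by
  intro fuel
  induction fuel with
  | zero =>
    intro a g hf ha hg
    rw [PySem.List.pyRange_one_eq_nil (by omega : yw ≤ a)]
    refine ⟨hg, ?_⟩
    intro i' j' _ _ _ _
    simp only [List.foldl_nil]
    rw [if_neg (by omega)]
  | succ k ih =>
    intro a g hf ha hg
    rw [PySem.List.pyRange_one_cons (by omega : a < yw)]
    simp only [List.foldl_cons]
    have hstep : pvLoop1 xw (g, a) a =
        ((PySem.List.pyRange 0 (xw - a) 1).foldl (fun g i => pvSet2 g i a 1) g, a + 1) := rfl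
    rw [hstep]
    obtain ⟨hps, hpc⟩ := pvPaint_char (n := n) (m := m) ha (by omega)
      (xw - a).toNat 0 (xw - a) g (by omega) (by omega) (by omega) hg
    obtain ⟨hs, hc⟩ := ih (a + 1) _ (by omega) (by omega) hps
    refine ⟨hs, ?_⟩
    intro i' j' hi'0 hi' hj'0 hj'
    rw [hc i' j' hi'0 hi' hj'0 hj', hpc i' j' hi'0 hi' hj'0 hj']
    split_ifs <;> first | rfl | omega

-- characterization of the upper-right triangle loop
lemma pvLoop2_char {n m : Nat} {nx xw yw : Int} (hn : (n : Int) = nx)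
    (_hxw0 : 0 ≤ xw) (hxw : xw ≤ nx) (hyw : 0 ≤ yw) :
    ∀ (fuel : Nat) (b c : Int) (g : List (List Int)), (b - yw).toNat = fuel →
      b < (m : Int) → 0 ≤ c → pvShape n m g →
      pvShape n m ((PySem.List.pyRange b yw (-1)).foldl (pvLoop2 nx xw) (g, c)).1 ∧
      ∀ i' j', 0 ≤ i' → i' < (n : Int) → 0 ≤ j' → j' < (m : Int) →
        pvGet2 ((PySem.List.pyRange b yw (-1)).foldl (pvLoop2 nx xw) (g, c)).1 i' j' =
          if yw < j' ∧ j' ≤ b ∧ nx - xw + c + (b - j') ≤ i' then 1 else pvGet2 g i' j' := by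
  intro fuel
  induction fuel with
  | zero =>
    intro b c g hf hb hc0 hg
    rw [PySem.List.pyRange_neg_one_eq_nil (by omega : b ≤ yw)]
    refine ⟨hg, ?_⟩
    intro i' j' _ _ _ _
    simp only [List.foldl_nil]
    rw [if_neg (by omega)]
  | succ k ih =>
    intro b c g hf hb hc0 hg
    rw [PySem.List.pyRange_neg_one_cons (by omega : yw < b)]
    simp only [List.foldl_cons]
    have hstep : pvLoop2 nx xw (g, c) b =
        ((PySem.List.pyRange (nx - xw + c) nx 1).foldl (fun g i => pvSet2 g i b 1) g, c + 1) := rfl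
    rw [hstep]
    obtain ⟨hps, hpc⟩ := pvPaint_char (n := n) (m := m) (by omega : (0:Int) ≤ b) hb
      (nx - (nx - xw + c)).toNat (nx - xw + c) nx g rfl (by omega) (by omega) hg
    obtain ⟨hs, hc⟩ := ih (b - 1) (c + 1) _ (by omega) (by omega) (by omega) hps
    refine ⟨hs, ?_⟩
    intro i' j' hi'0 hi' hj'0 hj'
    rw [hc i' j' hi'0 hi' hj'0 hj', hpc i' j' hi'0 hi' hj'0 hj']
    split_ifs <;> first | rfl | omega

-- characterization of the normalization inner loop (fixed row i, columns from b)
lemma pvNormRow_char {n m : Nat} {ny : Int} (hm : (m : Int) = ny) {i : Int}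
    (hi0 : 0 ≤ i) (hin : i < (n : Int)) :
    ∀ (fuel : Nat) (b : Int) (g gl gs : List (List Int)), (ny - b).toNat = fuel →
      0 ≤ b → pvShape n m g → pvShape n m gl → pvShape n m gs →
      (pvShape n m ((PySem.List.pyRange b ny 1).foldl (pvNormStep i) (g, gl, gs)).1 ∧
       pvShape n m ((PySem.List.pyRange b ny 1).foldl (pvNormStep i) (g, gl, gs)).2.1 ∧
       pvShape n m ((PySem.List.pyRange b ny 1).foldl (pvNormStep i) (g, gl, gs)).2.2) ∧
      ∀ i' j', 0 ≤ i' → i' < (n : Int) → 0 ≤ j' → j' < (m : Int) →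
        (pvGet2 ((PySem.List.pyRange b ny 1).foldl (pvNormStep i) (g, gl, gs)).1 i' j' =
          if i' = i ∧ b ≤ j' ∧ pvGet2 g i' j' ≠ 1 then 0 else pvGet2 g i' j') ∧
        (pvGet2 ((PySem.List.pyRange b ny 1).foldl (pvNormStep i) (g, gl, gs)).2.1 i' j' =
          if i' = i ∧ b ≤ j' ∧ pvGet2 g i' j' = 1 then 1 else pvGet2 gl i' j') ∧
        (pvGet2 ((PySem.List.pyRange b ny 1).foldl (pvNormStep i) (g, gl, gs)).2.2 i' j' =
          if i' = i ∧ b ≤ j' ∧ pvGet2 g i' j' ≠ 1 then 0 else pvGet2 gs i' j') := by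
  intro fuel
  induction fuel with
  | zero =>
    intro b g gl gs hf hb hg hgl hgs
    rw [PySem.List.pyRange_one_eq_nil (by omega : ny ≤ b)]
    refine ⟨⟨hg, hgl, hgs⟩, ?_⟩
    intro i' j' _ _ _ hj'
    simp only [List.foldl_nil]
    refine ⟨?_, ?_, ?_⟩ <;> rw [if_neg (by omega)]
  | succ k ih =>
    intro b g gl gs hf hb hg hgl hgs
    rw [PySem.List.pyRange_one_cons (by omega : b < ny)]
    simp only [List.foldl_cons]
    have hbm : b < (m : Int) := by omega
    by_cases hv : pvGet2 g i b = 1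
    · have hstep : pvNormStep i (g, gl, gs) b = (g, pvSet2 gl i b 1, gs) := by
        simp [pvNormStep, hv]
      rw [hstep]
      have hgl' : pvShape n m (pvSet2 gl i b 1) := pvShape_pvSet2 hgl 1 hi0 hb
      obtain ⟨hs, hc⟩ := ih (b + 1) g (pvSet2 gl i b 1) gs (by omega) (by omega) hg hgl' hgs
      refine ⟨hs, ?_⟩
      intro i' j' hi'0 hi' hj'0 hj'
      obtain ⟨h1, h2, h3⟩ := hc i' j' hi'0 hi' hj'0 hj'
      refine ⟨?_, ?_, ?_⟩
      · rw [h1]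
        by_cases hib : i' = i ∧ j' = b
        · have hv' : pvGet2 g i' j' = 1 := by rw [hib.1, hib.2]; exact hv
          rw [if_neg (show ¬ (i' = i ∧ b + 1 ≤ j' ∧ pvGet2 g i' j' ≠ 1) by simp [hv']),
            if_neg (show ¬ (i' = i ∧ b ≤ j' ∧ pvGet2 g i' j' ≠ 1) by simp [hv'])]
        · split_ifs <;> first | rfl | omega
      · rw [h2, pvGet2_pvSet2 hgl 1 hi0 hin hb hbm hi'0 hi' hj'0 hj']
        by_cases hib : i' = i ∧ j' = b
        · have hv' : pvGet2 g i' j' = 1 := by rw [hib.1, hib.2]; exact hv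
          rw [if_neg (show ¬ (i' = i ∧ b + 1 ≤ j' ∧ pvGet2 g i' j' = 1) from
              fun hh => (show ¬ b + 1 ≤ j' by omega) hh.2.1),
            if_pos (show i' = i ∧ j' = b from hib),
            if_pos (show i' = i ∧ b ≤ j' ∧ pvGet2 g i' j' = 1 from ⟨hib.1, by omega, hv'⟩)]
        · rw [if_neg hib]
          split_ifs <;> first | rfl | omega
      · rw [h3]
        by_cases hib : i' = i ∧ j' = b
        · have hv' : pvGet2 g i' j' = 1 := by rw [hib.1, hib.2]; exact hv
          rw [if_neg (show ¬ (i' = i ∧ b + 1 ≤ j' ∧ pvGet2 g i' j' ≠ 1) by simp [hv']),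
            if_neg (show ¬ (i' = i ∧ b ≤ j' ∧ pvGet2 g i' j' ≠ 1) by simp [hv'])]
        · split_ifs <;> first | rfl | omega
    · have hm0 : pvGet2 (pvSet2 g i b 0) i b = 0 := by
        rw [pvGet2_pvSet2 hg 0 hi0 hin hb hbm hi0 hin hb hbm, if_pos ⟨rfl, rfl⟩]
      have hstep : pvNormStep i (g, gl, gs) b = (pvSet2 g i b 0, gl, pvSet2 gs i b 0) := by
        simp [pvNormStep, hv, hm0]
      rw [hstep]
      have hg' : pvShape n m (pvSet2 g i b 0) := pvShape_pvSet2 hg 0 hi0 hb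
      have hgs' : pvShape n m (pvSet2 gs i b 0) := pvShape_pvSet2 hgs 0 hi0 hb
      obtain ⟨hs, hc⟩ := ih (b + 1) (pvSet2 g i b 0) gl (pvSet2 gs i b 0) (by omega) (by omega) hg' hgl hgs'
      refine ⟨hs, ?_⟩
      intro i' j' hi'0 hi' hj'0 hj'
      obtain ⟨h1, h2, h3⟩ := hc i' j' hi'0 hi' hj'0 hj'
      have hge : pvGet2 (pvSet2 g i b 0) i' j' = if i' = i ∧ j' = b then 0 else pvGet2 g i' j' :=
        pvGet2_pvSet2 hg 0 hi0 hin hb hbm hi'0 hi' hj'0 hj'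
      have hges : pvGet2 (pvSet2 gs i b 0) i' j' = if i' = i ∧ j' = b then 0 else pvGet2 gs i' j' :=
        pvGet2_pvSet2 hgs 0 hi0 hin hb hbm hi'0 hi' hj'0 hj'
      refine ⟨?_, ?_, ?_⟩
      · rw [h1, hge]
        by_cases hib : i' = i ∧ j' = b
        · have hv' : pvGet2 g i' j' ≠ 1 := by rw [hib.1, hib.2]; exact hv
          rw [if_pos (show i' = i ∧ j' = b from hib),
            if_neg (show ¬ (i' = i ∧ b + 1 ≤ j' ∧ (0 : Int) ≠ 1) from
              fun hh => (show ¬ b + 1 ≤ j' by omega) hh.2.1),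
            if_pos (show i' = i ∧ b ≤ j' ∧ pvGet2 g i' j' ≠ 1 from ⟨hib.1, by omega, hv'⟩)]
        · rw [if_neg hib]
          split_ifs <;> first | rfl | omega
      · rw [h2, hge]
        by_cases hib : i' = i ∧ j' = b
        · have hv' : pvGet2 g i' j' ≠ 1 := by rw [hib.1, hib.2]; exact hv
          rw [if_pos (show i' = i ∧ j' = b from hib),
            if_neg (show ¬ (i' = i ∧ b + 1 ≤ j' ∧ (0 : Int) = 1) by norm_num),
            if_neg (show ¬ (i' = i ∧ b ≤ j' ∧ pvGet2 g i' j' = 1) from fun hh => hv' hh.2.2)]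
        · rw [if_neg hib]
          split_ifs <;> first | rfl | omega
      · rw [h3, hge, hges]
        by_cases hib : i' = i ∧ j' = b
        · have hv' : pvGet2 g i' j' ≠ 1 := by rw [hib.1, hib.2]; exact hv
          rw [if_pos (show i' = i ∧ j' = b from hib), if_pos (show i' = i ∧ j' = b from hib),
            if_neg (show ¬ (i' = i ∧ b + 1 ≤ j' ∧ (0 : Int) ≠ 1) from
              fun hh => (show ¬ b + 1 ≤ j' by omega) hh.2.1),
            if_pos (show i' = i ∧ b ≤ j' ∧ pvGet2 g i' j' ≠ 1 from ⟨hib.1, by omega, hv'⟩)]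
        · rw [if_neg hib, if_neg hib]
          split_ifs <;> first | rfl | omega

-- characterization of the whole normalization pass (rows from a)
lemma pvNorm_char {n m : Nat} {nx ny : Int} (hn : (n : Int) = nx) (hm : (m : Int) = ny) :
    ∀ (fuel : Nat) (a : Int) (g gl gs : List (List Int)), (nx - a).toNat = fuel →
      0 ≤ a → pvShape n m g → pvShape n m gl → pvShape n m gs →
      (pvShape n m ((PySem.List.pyRange a nx 1).foldl (pvNormRow ny) (g, gl, gs)).1 ∧
       pvShape n m ((PySem.List.pyRange a nx 1).foldl (pvNormRow ny) (g, gl, gs)).2.1 ∧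
       pvShape n m ((PySem.List.pyRange a nx 1).foldl (pvNormRow ny) (g, gl, gs)).2.2) ∧
      ∀ i' j', 0 ≤ i' → i' < (n : Int) → 0 ≤ j' → j' < (m : Int) →
        (pvGet2 ((PySem.List.pyRange a nx 1).foldl (pvNormRow ny) (g, gl, gs)).1 i' j' =
          if a ≤ i' ∧ pvGet2 g i' j' ≠ 1 then 0 else pvGet2 g i' j') ∧
        (pvGet2 ((PySem.List.pyRange a nx 1).foldl (pvNormRow ny) (g, gl, gs)).2.1 i' j' =
          if a ≤ i' ∧ pvGet2 g i' j' = 1 then 1 else pvGet2 gl i' j') ∧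
        (pvGet2 ((PySem.List.pyRange a nx 1).foldl (pvNormRow ny) (g, gl, gs)).2.2 i' j' =
          if a ≤ i' ∧ pvGet2 g i' j' ≠ 1 then 0 else pvGet2 gs i' j') := by
  intro fuel
  induction fuel with
  | zero =>
    intro a g gl gs hf ha hg hgl hgs
    rw [PySem.List.pyRange_one_eq_nil (by omega : nx ≤ a)]
    simp only [List.foldl_nil]
    refine ⟨⟨hg, hgl, hgs⟩, ?_⟩
    intro i' j' hi'0 hi' hj'0 hj'
    refine ⟨?_, ?_, ?_⟩ <;> rw [if_neg (by omega)]
  | succ k ih =>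
    intro a g gl gs hf ha hg hgl hgs
    rw [PySem.List.pyRange_one_cons (by omega : a < nx)]
    simp only [List.foldl_cons]
    have han : a < (n : Int) := by omega
    have hrow := pvNormRow_char (n := n) (m := m) hm (i := a) ha han
      ny.toNat 0 g gl gs (by omega) (by omega) hg hgl hgs
    obtain ⟨⟨hs1, hs2, hs3⟩, hcr⟩ := hrow
    have hnr : pvNormRow ny (g, gl, gs) a = (PySem.List.pyRange 0 ny 1).foldl (pvNormStep a) (g, gl, gs) := rfl
    set st' := (PySem.List.pyRange 0 ny 1).foldl (pvNormStep a) (g, gl, gs) with hst'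
    have hst'e : pvNormRow ny (g, gl, gs) a = (st'.1, st'.2.1, st'.2.2) := by rw [hnr]
    rw [hst'e]
    obtain ⟨ihs, ihc⟩ := ih (a + 1) st'.1 st'.2.1 st'.2.2 (by omega) (by omega) hs1 hs2 hs3
    refine ⟨ihs, ?_⟩
    intro i' j' hi'0 hi' hj'0 hj'
    obtain ⟨hc1, hc2, hc3⟩ := hcr i' j' hi'0 hi' hj'0 hj'
    obtain ⟨g1, g2, g3⟩ := ihc i' j' hi'0 hi' hj'0 hj'
    have hany : pvGet2 st'.1 i' j' = if i' = a ∧ pvGet2 g i' j' ≠ 1 then 0 else pvGet2 g i' j' := by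
      rw [hc1]
      split_ifs <;> first | rfl | omega
    refine ⟨?_, ?_, ?_⟩
    · rw [g1, hany]
      by_cases hia : i' = a
      · by_cases hv : pvGet2 g i' j' = 1
        · rw [if_neg (show ¬ (i' = a ∧ pvGet2 g i' j' ≠ 1) by simp [hv]),
            if_neg (show ¬ (a + 1 ≤ i' ∧ pvGet2 g i' j' ≠ 1) by simp [hv]),
            if_neg (show ¬ (a ≤ i' ∧ pvGet2 g i' j' ≠ 1) by simp [hv])]
        · rw [if_pos (show i' = a ∧ pvGet2 g i' j' ≠ 1 from ⟨hia, hv⟩),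
            if_neg (show ¬ (a + 1 ≤ i' ∧ (0 : Int) ≠ 1) from
              fun hh => (show ¬ a + 1 ≤ i' by omega) hh.1),
            if_pos (show a ≤ i' ∧ pvGet2 g i' j' ≠ 1 from ⟨by omega, hv⟩)]
      · rw [if_neg (show ¬ (i' = a ∧ pvGet2 g i' j' ≠ 1) from fun hh => hia hh.1)]
        split_ifs <;> first | rfl | omega
    · rw [g2, hc2, hany]
      by_cases hia : i' = a
      · by_cases hv : pvGet2 g i' j' = 1
        · rw [if_neg (show ¬ (i' = a ∧ pvGet2 g i' j' ≠ 1) by simp [hv]),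
            if_neg (show ¬ (a + 1 ≤ i' ∧ pvGet2 g i' j' = 1) from
              fun hh => (show ¬ a + 1 ≤ i' by omega) hh.1),
            if_pos (show i' = a ∧ 0 ≤ j' ∧ pvGet2 g i' j' = 1 from ⟨hia, hj'0, hv⟩),
            if_pos (show a ≤ i' ∧ pvGet2 g i' j' = 1 from ⟨by omega, hv⟩)]
        · rw [if_pos (show i' = a ∧ pvGet2 g i' j' ≠ 1 from ⟨hia, hv⟩),
            if_neg (show ¬ (a + 1 ≤ i' ∧ (0 : Int) = 1) by norm_num),
            if_neg (show ¬ (i' = a ∧ 0 ≤ j' ∧ pvGet2 g i' j' = 1) from fun hh => hv hh.2.2),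
            if_neg (show ¬ (a ≤ i' ∧ pvGet2 g i' j' = 1) from fun hh => hv hh.2)]
      · rw [if_neg (show ¬ (i' = a ∧ pvGet2 g i' j' ≠ 1) from fun hh => hia hh.1),
          if_neg (show ¬ (i' = a ∧ 0 ≤ j' ∧ pvGet2 g i' j' = 1) from fun hh => hia hh.1)]
        split_ifs <;> first | rfl | omega
    · rw [g3, hc3, hany]
      by_cases hia : i' = a
      · by_cases hv : pvGet2 g i' j' = 1
        · rw [if_neg (show ¬ (i' = a ∧ pvGet2 g i' j' ≠ 1) by simp [hv]),
            if_neg (show ¬ (a + 1 ≤ i' ∧ pvGet2 g i' j' ≠ 1) by simp [hv]),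
            if_neg (show ¬ (i' = a ∧ 0 ≤ j' ∧ pvGet2 g i' j' ≠ 1) by simp [hv]),
            if_neg (show ¬ (a ≤ i' ∧ pvGet2 g i' j' ≠ 1) by simp [hv])]
        · rw [if_pos (show i' = a ∧ pvGet2 g i' j' ≠ 1 from ⟨hia, hv⟩),
            if_neg (show ¬ (a + 1 ≤ i' ∧ (0 : Int) ≠ 1) from
              fun hh => (show ¬ a + 1 ≤ i' by omega) hh.1),
            if_pos (show i' = a ∧ 0 ≤ j' ∧ pvGet2 g i' j' ≠ 1 from ⟨hia, hj'0, hv⟩),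
            if_pos (show a ≤ i' ∧ pvGet2 g i' j' ≠ 1 from ⟨by omega, hv⟩)]
      · rw [if_neg (show ¬ (i' = a ∧ pvGet2 g i' j' ≠ 1) from fun hh => hia hh.1),
          if_neg (show ¬ (i' = a ∧ 0 ≤ j' ∧ pvGet2 g i' j' ≠ 1) from fun hh => hia hh.1)]
        split_ifs <;> first | rfl | omega

-- a grid of known shape with known entries is the corresponding comprehension
lemma pvGrid_ext {n m : Nat} {g : List (List Int)} (hg : pvShape n m g) (F : Int → Int → Int)
    (h : ∀ i' j', 0 ≤ i' → i' < (n : Int) → 0 ≤ j' → j' < (m : Int) → pvGet2 g i' j' = F i' j') :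
    g = (PySem.List.pyRange 0 (n : Int) 1).map (fun i => (PySem.List.pyRange 0 (m : Int) 1).map (fun j => F i j)) := by
  obtain ⟨hlen, hrow⟩ := hg
  rw [PySem.List.pyRange_zero_natCast n, List.map_map]
  apply List.ext_getElem
  · simp [hlen]
  · intro k h1 h2
    have hkn : k < n := by simpa using h2
    have hgk : g[k].length = m := hrow _ (List.getElem_mem _)
    simp only [List.getElem_map, List.getElem_range, Function.comp_apply]
    rw [PySem.List.pyRange_zero_natCast m, List.map_map]
    apply List.ext_getElem
    · simp [hgk]
    · intro l l1 l2
      have hlm : l < m := by simpa using l2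
      simp only [List.getElem_map, List.getElem_range, Function.comp_apply]
      have := h (k : Int) (l : Int) (by omega) (by omega) (by omega) (by omega)
      rw [pvGet2_nonneg (by omega) (by omega)] at this
      simp only [Int.toNat_natCast] at this
      rw [List.getD_eq_getElem g [] (by omega : k < g.length),
        List.getD_eq_getElem g[k] 0 (by omega : l < g[k].length)] at this
      exact this

lemma pvTrunc04_nonneg {x : Int} (h : 0 ≤ x) : 0 ≤ pvTrunc04 x := by
  rw [pvTrunc04, if_pos h]; omega

lemma pvTrunc04_lt {x : Int} (h : 1 ≤ x) : pvTrunc04 x < x := by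
  rw [pvTrunc04, if_pos (by omega)]; omega

lemma pvTrunc04_nonpos {x : Int} (h : x ≤ 0) : pvTrunc04 x ≤ 0 ∧ x ≤ pvTrunc04 x := by
  rw [pvTrunc04]
  split_ifs <;> omega

-- the two degenerate loops leave the grid unchanged when xw ≤ 0 (nx ≤ 0 case)
lemma pvLoop1_fixed {xw : Int} (hxw : xw ≤ 0) :
    ∀ (l : List Int) (g : List (List Int)) (c : Int), 0 ≤ c →
      (l.foldl (pvLoop1 xw) (g, c)).1 = g := by
  intro l
  induction l with
  | nil => intro g c _; rfl
  | cons x xs ih =>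
    intro g c hc
    simp only [List.foldl_cons]
    have : pvLoop1 xw (g, c) x = (g, c + 1) := by
      rw [pvLoop1, PySem.List.pyRange_one_eq_nil (by omega : xw - c ≤ 0)]
      rfl
    rw [this]
    exact ih g (c + 1) (by omega)

lemma pvLoop2_fixed {nx xw : Int} (hxw : xw ≤ 0) :
    ∀ (l : List Int) (g : List (List Int)) (c : Int), 0 ≤ c →
      (l.foldl (pvLoop2 nx xw) (g, c)).1 = g := by
  intro l
  induction l with
  | nil => intro g c _; rfl
  | cons x xs ih =>
    intro g c hc
    simp only [List.foldl_cons]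
    have : pvLoop2 nx xw (g, c) x = (g, c + 1) := by
      rw [pvLoop2, PySem.List.pyRange_one_eq_nil (by omega : nx ≤ nx - xw + c)]
      rfl
    rw [this]
    exact ih g (c + 1) (by omega)

-- the normalization pass is the identity when ny ≤ 0 (all rows empty)
lemma pvNorm_fixed {ny : Int} (hny : ny ≤ 0) :
    ∀ (l : List Int) (st : List (List Int) × List (List Int) × List (List Int)),
      l.foldl (pvNormRow ny) st = st := by
  intro l
  induction l with
  | nil => intro st; rfl
  | cons x xs ih =>
    intro st
    simp only [List.foldl_cons]
    have : pvNormRow ny st x = st := by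
      rw [pvNormRow, PySem.List.pyRange_one_eq_nil (by omega : ny ≤ 0)]
      rfl
    rw [this]
    exact ih st

-- ===== VERDICT (by name: the statement is the Claim_ definition above) =====
theorem gen_lsmask_spec : Claim_equal_gen_lsmask := by
  intro nx ny _
  simp only [Spec_gen_lsmask, gen_lsmask, gen_lsmask_alt]
  by_cases hnx : nx ≤ 0
  · -- nx ≤ 0: all grids are empty
    have hnil : PySem.List.pyRange 0 nx 1 = [] := PySem.List.pyRange_one_eq_nil (by omega)
    have hxw := pvTrunc04_nonpos (x := nx) hnx
    have h1 := pvLoop1_fixed (show pvTrunc04 nx ≤ 0 by omega)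
      (PySem.List.pyRange 0 (pvTrunc04 ny) 1) (pvInitGrid nx ny) 0 le_rfl
    have h2 := pvLoop2_fixed (nx := nx) (show pvTrunc04 nx ≤ 0 by omega)
      (PySem.List.pyRange (ny - 1) (pvTrunc04 ny) (-1))
      ((List.foldl (pvLoop1 (pvTrunc04 nx)) (pvInitGrid nx ny, 0)
        (PySem.List.pyRange 0 (pvTrunc04 ny) 1)).1) 0 le_rfl
    simp only [pvInitGrid, hnil, List.map_nil] at h1 h2
    simp only [pvInitGrid, hnil, List.map_nil, List.foldl_nil]
    rw [h2, h1]
  · rw [not_le] at hnx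
    by_cases hny : ny ≤ 0
    · -- nx ≥ 1, ny ≤ 0: rows are empty; both loops and the pass do nothing
      have hyw := pvTrunc04_nonpos (x := ny) hny
      have hynil : PySem.List.pyRange 0 (pvTrunc04 ny) 1 = [] :=
        PySem.List.pyRange_one_eq_nil (by omega)
      have hynil2 : PySem.List.pyRange (ny - 1) (pvTrunc04 ny) (-1) = [] :=
        PySem.List.pyRange_neg_one_eq_nil (by omega)
      have hrnil : PySem.List.pyRange 0 ny 1 = [] := PySem.List.pyRange_one_eq_nil (by omega)
      rw [hynil, hynil2]
      simp only [List.foldl_nil]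
      rw [pvNorm_fixed hny]
      simp [pvInitGrid, hrnil]
    · -- main case: nx ≥ 1, ny ≥ 1
      rw [not_le] at hny
      set n := nx.toNat with hnn
      set m := ny.toNat with hmm
      have hn : (n : Int) = nx := by omega
      have hm : (m : Int) = ny := by omega
      set xw := pvTrunc04 nx with hxwd
      set yw := pvTrunc04 ny with hywd
      have hxw0 : 0 ≤ xw := pvTrunc04_nonneg (by omega)
      have hxwn : xw < nx := pvTrunc04_lt (by omega)
      have hyw0 : 0 ≤ yw := pvTrunc04_nonneg (by omega)
      have hywn : yw < ny := pvTrunc04_lt (by omega)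
      have hinit : pvShape n m (pvInitGrid nx ny) := by
        rw [hnn, hmm]; exact pvShape_init nx ny
      -- loop 1
      obtain ⟨hs1, hc1⟩ := pvLoop1_char (n := n) (m := m) (xw := xw) (yw := yw)
        (by omega) (by omega) yw.toNat 0 (pvInitGrid nx ny) (by omega) le_rfl hinit
      set r1 := ((PySem.List.pyRange 0 yw 1).foldl (pvLoop1 xw) (pvInitGrid nx ny, 0)).1 with hr1
      -- loop 2
      obtain ⟨hs2, hc2⟩ := pvLoop2_char (n := n) (m := m) (nx := nx) (xw := xw) (yw := yw)
        hn hxw0 (by omega) hyw0 ((ny - 1) - yw).toNat (ny - 1) 0 r1 rfl (by omega) le_rfl hs1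
      set r2 := ((PySem.List.pyRange (ny - 1) yw (-1)).foldl (pvLoop2 nx xw) (r1, 0)).1 with hr2
      -- the painted mask is the land indicator over -1
      have hmask : ∀ i' j', 0 ≤ i' → i' < (n : Int) → 0 ≤ j' → j' < (m : Int) →
          pvGet2 r2 i' j' = if pvLand nx ny xw yw i' j' then 1 else -1 := by
        intro i' j' hi'0 hi' hj'0 hj'
        rw [hr2, hc2 i' j' hi'0 hi' hj'0 hj', hc1 i' j' hi'0 hi' hj'0 hj',
          pvGet2_init hi'0 (by omega) hj'0 (by omega)]
        simp only [pvLand, Bool.or_eq_true, Bool.and_eq_true, decide_eq_true_eq]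
        split_ifs <;> first | rfl | omega
      -- normalization pass
      obtain ⟨⟨hfs1, hfs2, hfs3⟩, hfc⟩ := pvNorm_char (n := n) (m := m) hn hm nx.toNat 0 r2
        (pvInitGrid nx ny) (pvInitGrid nx ny) (by omega) le_rfl hs2 hinit hinit
      set fin := (PySem.List.pyRange 0 nx 1).foldl (pvNormRow ny) (r2, pvInitGrid nx ny, pvInitGrid nx ny) with hfin
      have e1 : fin.1 = (PySem.List.pyRange 0 (n : Int) 1).map (fun i =>
          (PySem.List.pyRange 0 (m : Int) 1).map (fun j => if pvLand nx ny xw yw i j then (1 : Int) else 0)) := by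
        apply pvGrid_ext hfs1
        intro i' j' hi'0 hi' hj'0 hj'
        obtain ⟨c1, _, _⟩ := hfc i' j' hi'0 hi' hj'0 hj'
        rw [c1, hmask i' j' hi'0 hi' hj'0 hj']
        by_cases hl : pvLand nx ny xw yw i' j' = true
        · simp [hl]
        · simp [hl, hi'0]
      have e2 : fin.2.1 = (PySem.List.pyRange 0 (n : Int) 1).map (fun i =>
          (PySem.List.pyRange 0 (m : Int) 1).map (fun j => if pvLand nx ny xw yw i j then (1 : Int) else -1)) := by
        apply pvGrid_ext hfs2
        intro i' j' hi'0 hi' hj'0 hj'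
        obtain ⟨_, c2, _⟩ := hfc i' j' hi'0 hi' hj'0 hj'
        rw [c2, hmask i' j' hi'0 hi' hj'0 hj', pvGet2_init hi'0 (by omega) hj'0 (by omega)]
        by_cases hl : pvLand nx ny xw yw i' j' = true
        · simp [hl, hi'0]
        · simp [hl]
      have e3 : fin.2.2 = (PySem.List.pyRange 0 (n : Int) 1).map (fun i =>
          (PySem.List.pyRange 0 (m : Int) 1).map (fun j => if pvLand nx ny xw yw i j then (-1 : Int) else 0)) := by
        apply pvGrid_ext hfs3
        intro i' j' hi'0 hi' hj'0 hj'
        obtain ⟨_, _, c3⟩ := hfc i' j' hi'0 hi' hj'0 hj'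
        rw [c3, hmask i' j' hi'0 hi' hj'0 hj', pvGet2_init hi'0 (by omega) hj'0 (by omega)]
        by_cases hl : pvLand nx ny xw yw i' j' = true
        · simp [hl]
        · simp [hl, hi'0]
      rw [hn, hm] at e1 e2 e3
      simp only [Prod.mk.injEq]
      exact ⟨e1, e2, e3⟩
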